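-- pv_equiv track=rewrite | github.com/SeojinYoon/Seojin_commonTool | Module/sj_string.py | str_join_multi_delimiters
-- ===== SOURCE A (Python) =====
-- def str_join_multi_delimiters(strs, delimiters = ["_"]):
--     """
--     join string
--
--     :param strs: list of string
--     :param delimiter: delimiters
--
--     return: combination string
--     """
--     strs = list(filter(lambda str: str != "", strs))
--
--     if len(strs) == 1:
--         return str(strs[0])
--     else:
--         current_delimiter = delimiters[0]
--         next_delimiters = delimiters[1:] + [current_delimiter]
--         return strs[0] + delimiters[0] + str_join_multi_delimiters(strs[1:], next_delimiters)
-- ===== SOURCE B (Python) =====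
-- def str_join_multi_delimiters(strs, delimiters = ["_"]):
--     strs = [s for s in strs if s != ""]
--     if len(strs) == 1:
--         return str(strs[0])
--     m = len(delimiters)
--     result = strs[0]
--     for i, part in enumerate(strs[1:]):
--         result += delimiters[i % m] + part
--     return result
-- ===== Notes on version B (the rewrite author's own statement) =====
-- stated objective: faster
-- what changed: Replaced A's tail recursion, which re-filters the remaining list and slices & rotates the delimiter list at every recursion level, by a single filter followed by one iterative loop over enumerate(strs[1:]) that indexes delimiters[i % m] directly.
import Mathlib
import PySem

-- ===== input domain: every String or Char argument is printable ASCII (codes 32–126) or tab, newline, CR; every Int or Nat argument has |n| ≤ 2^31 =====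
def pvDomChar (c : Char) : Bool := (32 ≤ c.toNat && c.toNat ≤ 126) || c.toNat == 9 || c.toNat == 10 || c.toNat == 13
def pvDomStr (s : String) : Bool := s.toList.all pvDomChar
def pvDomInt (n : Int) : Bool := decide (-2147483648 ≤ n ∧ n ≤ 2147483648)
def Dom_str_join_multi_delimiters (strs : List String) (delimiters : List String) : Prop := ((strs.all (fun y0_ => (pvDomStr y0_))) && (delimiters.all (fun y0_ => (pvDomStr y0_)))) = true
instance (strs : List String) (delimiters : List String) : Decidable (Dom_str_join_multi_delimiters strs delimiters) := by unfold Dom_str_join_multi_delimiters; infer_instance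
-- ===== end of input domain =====

-- B replaces A's tail recursion (which re-filters, slices and rotates the delimiter list at
-- every level) by a single pass: one filter, then one loop over the enumerated tail indexing
-- delimiters[i % m]; simpler and no per-step list copies.

-- ===== PORT A =====
-- Literal transliteration of A. Where Python raises IndexError (empty filtered list → strs[0];
-- empty delimiters with ≥ 2 surviving strings → delimiters[0]) the port returns the default
-- "" — exactly those inputs are excluded by Pre_.
def str_join_multi_delimiters (strs : List String) (delimiters : List String) : String :=
  if (strs.filter (fun t => t ≠ "")).length = 1 then
    (strs.filter (fun t => t ≠ "")).headD ""        -- str(strs[0]); str of a string is itself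
  else if strs.filter (fun t => t ≠ "") = [] then
    ""                                              -- Python raises IndexError at strs[0] (outside Pre_)
  else
    -- current_delimiter = delimiters[0]; next_delimiters = delimiters[1:] + [current_delimiter]
    (strs.filter (fun t => t ≠ "")).headD "" ++ delimiters.headD "" ++
      str_join_multi_delimiters ((strs.filter (fun t => t ≠ "")).drop 1)
        (delimiters.drop 1 ++ [delimiters.headD ""])
termination_by strs.length
decreasing_by
  rename_i _h1 h2
  simp only [List.length_drop, List.length_unattach]
  have h5 := List.length_pos_of_ne_nil h2
  simp only [List.length_unattach] at h5
  refine Nat.lt_of_lt_of_le (Nat.sub_lt h5 Nat.one_pos) ?_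
  exact le_trans (List.length_filter_le _ _) (by simp)

-- ===== PORT B =====
-- Transliteration of Source B: filter once, then a fold over enumerate(strs[1:]) indexing
-- delimiters[i % m]; strs[0] on an empty filtered list (Python IndexError) and i % 0
-- (Python ZeroDivisionError) are outside Pre_, totalised with "".
def str_join_multi_delimiters_alt (strs : List String) (delimiters : List String) : String :=
  if (strs.filter (fun t => t ≠ "")).length = 1 then
    (strs.filter (fun t => t ≠ "")).headD ""
  else
    (PySem.List.enumerate ((strs.filter (fun t => t ≠ "")).drop 1) 0).foldl
      (fun acc p =>
        acc ++ PySem.List.pyGetD delimiters (PySem.Int.mod p.1 (delimiters.length : Int)) "" ++ p.2)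
      ((strs.filter (fun t => t ≠ "")).headD "")

-- ===== PRECONDITION & SPEC =====
-- Pre_ excludes exactly the inputs where Python A raises IndexError: all strings empty after
-- filtering (strs[0] fails), or ≥ 2 survivors with an empty delimiter list (delimiters[0] fails).
def Pre_str_join_multi_delimiters (strs : List String) (delimiters : List String) : Prop :=
  strs.filter (fun t => t ≠ "") ≠ [] ∧
    ((strs.filter (fun t => t ≠ "")).length = 1 ∨ delimiters ≠ [])
instance (strs : List String) (delimiters : List String) : Decidable (Pre_str_join_multi_delimiters strs delimiters) := by
  unfold Pre_str_join_multi_delimiters; infer_instance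

def pvWitness_str_join_multi_delimiters : List String × List String := (["a", "", "b", "c"], ["-", "+"])

def Spec_str_join_multi_delimiters (strs : List String) (delimiters : List String) (out : String) : Prop := out = str_join_multi_delimiters_alt strs delimiters
instance (strs : List String) (delimiters : List String) (out : String) : Decidable (Spec_str_join_multi_delimiters strs delimiters out) := by unfold Spec_str_join_multi_delimiters; infer_instance

-- ===== CLAIM (what is proved, stated in full; the proofs are below) =====
def Claim_equal_str_join_multi_delimiters : Prop := ∀ (strs : List String) (delimiters : List String), Dom_str_join_multi_delimiters strs delimiters → Pre_str_join_multi_delimiters strs delimiters → Spec_str_join_multi_delimiters strs delimiters (str_join_multi_delimiters strs delimiters)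

-- ===== LEMMAS AND PROOFS =====

lemma filter_ne_self (l : List String) (h : ∀ y ∈ l, y ≠ "") :
    l.filter (fun t => t ≠ "") = l := by
  rw [List.filter_eq_self]
  intro a ha
  simpa using h a ha

-- cyclic tail join: delimiters indexed k, k+1, … modulo their length, interleaved with t
def tjN (t : List String) (d : List String) (k : Nat) : String :=
  match t with
  | [] => ""
  | y :: rest => d.getD (k % d.length) "" ++ y ++ tjN rest d (k + 1)

-- B's fold over enumerate computes init ++ tjN
lemma foldl_enum_eq_tjN (t : List String) (d : List String) :
    ∀ (k : Nat) (init : String),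
      (PySem.List.enumerate t (k : Int)).foldl
        (fun acc p =>
          acc ++ PySem.List.pyGetD d (PySem.Int.mod p.1 (d.length : Int)) "" ++ p.2)
        init = init ++ tjN t d k := by
  induction t with
  | nil => intro k init; simp [PySem.List.enumerate_nil, tjN]
  | cons y rest ih =>
    intro k init
    rw [PySem.List.enumerate_cons]
    have hcast : ((k : Int) + 1) = ((k + 1 : Nat) : Int) := by push_cast; ring
    rw [List.foldl_cons, hcast, ih (k + 1)]
    rw [show PySem.Int.mod (k : Int) (d.length : Int) = ((k % d.length : Nat) : Int) from
      PySem.Int.mod_natCast k d.length]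
    rw [PySem.List.pyGetD_natCast]
    simp [tjN, String.append_assoc]

-- rotating the delimiter list shifts the cyclic index by one
lemma rot_getD (d : List String) (hd : d ≠ []) (k : Nat) :
    (d.drop 1 ++ [d.headD ""]).getD (k % (d.drop 1 ++ [d.headD ""]).length) "" =
      d.getD ((k + 1) % d.length) "" := by
  have hm : 1 ≤ d.length := by cases d <;> simp_all
  have hlen : (d.drop 1 ++ [d.headD ""]).length = d.length := by simp; omega
  rw [hlen]
  set m := d.length with hmdef
  have hj : k % m < m := Nat.mod_lt _ (by omega)
  have hdecomp : k = m * (k / m) + k % m := (Nat.div_add_mod k m).symm.trans (by ring_nf)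
  have hdl : (d.drop 1).length = m - 1 := by simp [hmdef]
  by_cases hlast : k % m = m - 1
  · have hmul : m * (k / m + 1) = m * (k / m) + m := by ring
    have h1 : (k + 1) % m = 0 := by
      have heq : k + 1 = m * (k / m + 1) := by omega
      rw [heq]; exact Nat.mul_mod_right _ _
    rw [hlast, h1]
    have hidx : m - 1 - (d.drop 1).length = 0 := by omega
    rw [List.getD, List.getElem?_append_right (by omega), hidx]
    cases d with
    | nil => simp_all
    | cons a l => simp [List.getD]
  · have hlt : k % m + 1 < m := by omega
    have h1 : (k + 1) % m = k % m + 1 := by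
      have heq : k + 1 = (k % m + 1) + m * (k / m) := by omega
      rw [heq, Nat.add_mul_mod_self_left, Nat.mod_eq_of_lt hlt]
    rw [h1, List.getD, List.getElem?_append_left (by omega), List.getElem?_drop, List.getD,
      Nat.add_comm]

-- tjN over the rotated delimiter list = tjN with the index shifted by one
lemma tjN_rot (t : List String) (d : List String) (hd : d ≠ []) :
    ∀ k : Nat, tjN t (d.drop 1 ++ [d.headD ""]) k = tjN t d (k + 1) := by
  induction t with
  | nil => intro k; simp [tjN]
  | cons y rest ih =>
    intro k
    simp only [tjN]
    rw [rot_getD d hd k, ih (k + 1)]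

-- A on an already-filtered nonempty list (+ nonempty delimiters) computes head ++ tjN tail
lemma A_eq_tjN (rest : List String) :
    ∀ (x : String) (d : List String), d ≠ [] → x ≠ "" → (∀ y ∈ rest, y ≠ "") →
      str_join_multi_delimiters (x :: rest) d = x ++ tjN rest d 0 := by
  induction rest with
  | nil =>
    intro x d hd hx _
    have hfil : (List.filter (fun t => decide (t ≠ "")) [x]) = [x] :=
      filter_ne_self [x] (by simpa using hx)
    rw [str_join_multi_delimiters, hfil]
    simp [tjN]
  | cons y rest' ih =>
    intro x d hd hx hall
    have hy : y ≠ "" := hall y (by simp)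
    have hall' : ∀ z ∈ rest', z ≠ "" := fun z hz => hall z (by simp [hz])
    have hfil : (List.filter (fun t => decide (t ≠ "")) (x :: y :: rest')) = x :: y :: rest' := by
      apply filter_ne_self
      intro a ha
      simp only [List.mem_cons] at ha
      rcases ha with rfl | rfl | h
      · exact hx
      · exact hy
      · exact hall' a h
    have hrot_ne : d.drop 1 ++ [d.headD ""] ≠ [] := by simp
    rw [str_join_multi_delimiters, hfil]
    rw [if_neg (by simp), if_neg (by simp)]
    simp only [List.drop_succ_cons, List.drop_zero, List.headD_cons]
    rw [ih y (d.drop 1 ++ [d.headD ""]) hrot_ne hy hall', tjN_rot rest' d hd 0]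
    simp [tjN, String.append_assoc, List.head?_eq_getElem?, List.getD]

-- A only depends on the filtered list
lemma A_filter_congr (strs s : List String) (d : List String)
    (hs : strs.filter (fun t => t ≠ "") = s) (hfix : s.filter (fun t => t ≠ "") = s) :
    str_join_multi_delimiters strs d = str_join_multi_delimiters s d := by
  conv_lhs => rw [str_join_multi_delimiters]
  conv_rhs => rw [str_join_multi_delimiters]
  rw [hs, hfix]

-- ===== VERDICT (by name: the statement is the Claim_ definition above) =====
theorem str_join_multi_delimiters_spec : Claim_equal_str_join_multi_delimiters := by
  intro strs d _ hpre
  unfold Spec_str_join_multi_delimiters str_join_multi_delimiters_alt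
  obtain ⟨hne, hone⟩ := hpre
  have hmem : ∀ y ∈ strs.filter (fun t => t ≠ ""), y ≠ "" := by
    intro y hy
    have := List.of_mem_filter hy
    simpa using this
  rcases hs : strs.filter (fun t => t ≠ "") with _ | ⟨x, rest⟩
  · exact absurd hs hne
  · rw [hs] at hmem
    have hx : x ≠ "" := hmem x (by simp)
    have hrest : ∀ y ∈ rest, y ≠ "" := fun y hy => hmem y (by simp [hy])
    have hfix : (x :: rest).filter (fun t => t ≠ "") = x :: rest :=
      filter_ne_self _ hmem
    rcases rest with _ | ⟨y, rest'⟩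
    · -- exactly one survivor
      rw [A_filter_congr strs [x] d hs hfix, str_join_multi_delimiters, hfix]
      simp
    · -- ≥ 2 survivors, so delimiters ≠ []
      have hd : d ≠ [] := by
        rcases hone with h | h
        · rw [hs] at h; simp at h
        · exact h
      rw [A_filter_congr strs (x :: y :: rest') d hs hfix,
          A_eq_tjN (y :: rest') x d hd hx hrest]
      rw [if_neg (by simp)]
      simp only [List.headD_cons, List.drop_succ_cons, List.drop_zero]
      have h := foldl_enum_eq_tjN (y :: rest') d 0 x
      simp only [Nat.cast_zero] at h
      exact h.symm
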